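-- pv_equiv track=rewrite | github.com/newliar/Experiment | test/src/read_map_json.py | which_floor
-- ===== SOURCE A (Python) =====
-- def which_floor(way_list, ele):
--     # i代表层数 flag跳出外层循环
--     i = 1
--     flag = 0
--     for m in way_list:
--         for n in m:
--             if n == ele:
--                 flag = 1
--                 break
--         if flag == 1:
--             break
--         i += 1
--     return i
-- ===== SOURCE B (Python) =====
-- def which_floor(way_list, ele):
--     # Build a table mapping each element to its 1-based floor (first/lowest floor
--     # wins for duplicates), then answer with a single lookup.
--     index = {}
--     for floor, m in enumerate(way_list, 1):
--         for n in m: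
--             if n not in index:
--                 index[n] = floor
--     return index.get(ele, len(way_list) + 1)
-- ===== Notes on version B (the rewrite author's own statement) =====
-- stated objective: alternative
-- what changed: Replaces the flag-controlled nested scan with early break by a precomputed element-to-floor dictionary (first occurrence wins) followed by a single get with default len(way_list)+1.
import Mathlib
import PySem

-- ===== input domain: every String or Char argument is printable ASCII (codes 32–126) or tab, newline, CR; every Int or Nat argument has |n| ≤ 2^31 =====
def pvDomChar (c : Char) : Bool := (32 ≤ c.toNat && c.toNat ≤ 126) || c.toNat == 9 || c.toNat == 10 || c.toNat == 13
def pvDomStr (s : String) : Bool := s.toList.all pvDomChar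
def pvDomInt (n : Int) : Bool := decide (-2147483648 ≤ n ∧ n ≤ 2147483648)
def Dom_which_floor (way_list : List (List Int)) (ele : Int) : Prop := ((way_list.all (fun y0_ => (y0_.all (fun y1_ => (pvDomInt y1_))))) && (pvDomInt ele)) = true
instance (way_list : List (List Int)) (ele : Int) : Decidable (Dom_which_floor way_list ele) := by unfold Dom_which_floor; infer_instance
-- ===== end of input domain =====

-- B replaces A's flag-controlled nested scan by a precomputed element→floor dictionary
-- (first occurrence wins) and a single lookup with default len(way_list)+1 (alternative).

-- ===== PORT A =====
-- inner 'for n in m: if n == ele: flag = 1; break' — returns the flag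
def whichInner (m : List Int) (ele : Int) : Bool :=
  match m with
  | [] => false
  | n :: rest => if n == ele then true else whichInner rest ele

-- outer loop: i starts at 1, breaks when flag = 1, else i += 1
def whichLoop (way_list : List (List Int)) (ele : Int) (i : Int) : Int :=
  match way_list with
  | [] => i
  | m :: rest => if whichInner m ele then i else whichLoop rest ele (i + 1)

def which_floor (way_list : List (List Int)) (ele : Int) : Int :=
  whichLoop way_list ele 1

-- ===== PORT B =====
-- 'for floor, m in enumerate(way_list, 1): for n in m: if n not in index: index[n] = floor'
-- then 'index.get(ele, len(way_list) + 1)'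
def which_floor_alt (way_list : List (List Int)) (ele : Int) : Int :=
  let index : PySem.Dict Int Int :=
    (PySem.List.enumerate way_list 1).foldl
      (fun d p => p.2.foldl (fun d n => if d.contains n then d else d.insert n p.1) d)
      PySem.Dict.empty
  index.getD ele ((way_list.length : Int) + 1)

-- ===== PRECONDITION & SPEC =====
def Spec_which_floor (way_list : List (List Int)) (ele : Int) (out : Int) : Prop := out = which_floor_alt way_list ele
instance (way_list : List (List Int)) (ele : Int) (out : Int) : Decidable (Spec_which_floor way_list ele out) := by unfold Spec_which_floor; infer_instance

-- ===== CLAIM (what is proved, stated in full; the proofs are below) =====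
def Claim_equal_which_floor : Prop := ∀ (way_list : List (List Int)) (ele : Int), Dom_which_floor way_list ele → Spec_which_floor way_list ele (which_floor way_list ele)

-- ===== LEMMAS AND PROOFS =====

-- A's search as an Option: the floor where ele is first found, if any
def scanOpt (way_list : List (List Int)) (ele : Int) (i : Int) : Option Int :=
  match way_list with
  | [] => none
  | m :: rest => if whichInner m ele then some i else scanOpt rest ele (i + 1)

theorem inner_get? (m : List Int) (ele fl : Int) (d : PySem.Dict Int Int) :
    (m.foldl (fun d n => if d.contains n then d else d.insert n fl) d).get? ele =
      if d.contains ele then d.get? ele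
      else if whichInner m ele then some fl else none := by
  induction m generalizing d with
  | nil =>
    by_cases h : d.contains ele = true
    · simp [h]
    · simp [h, whichInner, (PySem.Dict.get?_eq_none_iff_contains _ _).2 (by simpa using h)]
  | cons n rest ih =>
    simp only [List.foldl_cons, whichInner]
    by_cases hn : d.contains n = true
    · rw [if_pos hn, ih]
      by_cases he : d.contains ele = true
      · simp [he]
      · have hne : ¬ (n == ele) = true := by
          intro h; rw [beq_iff_eq] at h; subst h; exact he hn
        simp [he, hne]
    · rw [if_neg hn, ih]
      by_cases hne : n = ele
      · subst hne
        simp [hn, PySem.Dict.get?_insert_self]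
      · have h1 : (d.insert n fl).contains ele = d.contains ele := by
          simp [PySem.Dict.contains_insert, beq_iff_eq, Ne.symm hne]
        rw [h1, PySem.Dict.get?_insert_of_ne _ _ (Ne.symm hne)]
        simp [beq_iff_eq, hne]

theorem outer_get? (way_list : List (List Int)) (ele i : Int) (d : PySem.Dict Int Int) :
    ((PySem.List.enumerate way_list i).foldl
      (fun d p => p.2.foldl (fun d n => if d.contains n then d else d.insert n p.1) d) d).get? ele =
      if d.contains ele then d.get? ele else scanOpt way_list ele i := by
  induction way_list generalizing i d with
  | nil =>
    by_cases h : d.contains ele = true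
    · simp [PySem.List.enumerate, h]
    · simp [PySem.List.enumerate, scanOpt, h,
        (PySem.Dict.get?_eq_none_iff_contains _ _).2 (by simpa using h)]
  | cons m rest ih =>
    rw [PySem.List.enumerate_cons]
    simp only [List.foldl_cons]
    rw [ih]
    have hc : (m.foldl (fun d n => if d.contains n then d else d.insert n i) d).contains ele =
        (d.contains ele || whichInner m ele) := by
      rw [PySem.Dict.contains_eq_isSome_get?, inner_get? m ele i d]
      by_cases he : d.contains ele = true
      · simp only [he, if_true, Bool.true_or]
        rw [← PySem.Dict.contains_eq_isSome_get?]; exact he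
      · simp [he]
        by_cases hw : whichInner m ele = true <;> simp [hw]
    rw [hc, inner_get? m ele i d]
    by_cases he : d.contains ele = true
    · simp [he]
    · by_cases hw : whichInner m ele = true <;> simp [he, hw, scanOpt]

theorem scanOpt_getD (way_list : List (List Int)) (ele i : Int) :
    (scanOpt way_list ele i).getD (i + (way_list.length : Int)) = whichLoop way_list ele i := by
  induction way_list generalizing i with
  | nil => simp [scanOpt, whichLoop]
  | cons m rest ih =>
    by_cases hw : whichInner m ele = true
    · simp [scanOpt, whichLoop, hw]
    · have h := ih (i + 1)
      simp only [scanOpt, whichLoop, hw]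
      rw [← h]
      congr 1
      simp [List.length_cons]
      ring

-- ===== VERDICT (by name: the statement is the Claim_ definition above) =====
theorem which_floor_spec : Claim_equal_which_floor := by
  intro way_list ele _
  unfold Spec_which_floor which_floor which_floor_alt
  rw [PySem.Dict.getD_eq_get?_getD, outer_get?]
  simp only [PySem.Dict.contains_empty, if_false, Bool.false_eq_true]
  rw [show ((way_list.length : Int) + 1) = 1 + (way_list.length : Int) by ring]
  exact (scanOpt_getD way_list ele 1).symm
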